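-- pv_equiv track=rewrite | github.com/MorningStarOvO/ProAPO | tools/models/util_prompt.py | get_prompt_from_template_and_description
-- ===== SOURCE A (Python) =====
-- def get_prompt_from_template_and_description(prompt_agnostic, prompt_specific):
--
--     prompt_all_list = []
--     for temp_agnostic in prompt_agnostic:
--         for temp_specific in prompt_specific:
--
--             if "**+*+**" in temp_specific:
--                 temp_label = temp_specific.split("**+*+**")[0]
--                 temp_description = temp_specific.split("**+*+**")[1]
--                 temp_prompt = temp_agnostic.format(temp_label) + " " + temp_description
--             else:
--                 temp_prompt = temp_agnostic.format(temp_specific)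
--
--             prompt_all_list.append(temp_prompt.lower())
--
--     return prompt_all_list
-- ===== SOURCE B (Python) =====
-- SENTINEL = "**+*+**"
--
--
-- def _parse_specific(prompt_specific):
--     """Parse each specific entry ONCE into (lowered label, lowered ' description' suffix)."""
--     parsed = []
--     for s in prompt_specific:
--         if SENTINEL in s:
--             parts = s.split(SENTINEL)
--             parsed.append((parts[0].lower(), " " + parts[1].lower()))
--         else:
--             parsed.append((s.lower(), ""))
--     return parsed
--
--
-- def _parse_template(t):
--     """Split a template ONCE into lowered literal segments around its '{}' slots,
--     honouring the '{{' / '}}' escapes; a lone brace is kept literally."""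
--     segs, cur, i, n = [], [], 0, len(t)
--     while i < n:
--         c = t[i]
--         if c == "{" and i + 1 < n and t[i + 1] == "{":
--             cur.append("{")
--             i += 2
--         elif c == "}" and i + 1 < n and t[i + 1] == "}":
--             cur.append("}")
--             i += 2
--         elif c == "{" and i + 1 < n and t[i + 1] == "}":
--             segs.append("".join(cur).lower())
--             cur = []
--             i += 2
--         else:
--             cur.append(c)
--             i += 1
--     segs.append("".join(cur).lower())
--     return segs
--
--
-- def get_prompt_from_template_and_description(prompt_agnostic, prompt_specific):
--     parsed = _parse_specific(prompt_specific)
--     out = []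
--     for t in prompt_agnostic:
--         segs = _parse_template(t)
--         for label, desc in parsed:
--             out.append(label.join(segs) + desc)
--     return out
-- ===== Notes on version B (the rewrite author's own statement) =====
-- stated objective: faster
-- what changed: B hoists all parsing out of the product loop: it parses each sentinel-tagged specific and each template's '{}' segments once (already lowercased), so the inner loop only joins precomputed pieces instead of re-splitting, re-formatting and re-lowercasing every pair (constant-factor speedup, measured).
-- outside the precondition, e.g. on get_prompt_from_template_and_description(['Photo of {0}.'], ['Dog']): A returns ['photo of dog.'], B returns ['photo of {0}.']
import Mathlib
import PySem

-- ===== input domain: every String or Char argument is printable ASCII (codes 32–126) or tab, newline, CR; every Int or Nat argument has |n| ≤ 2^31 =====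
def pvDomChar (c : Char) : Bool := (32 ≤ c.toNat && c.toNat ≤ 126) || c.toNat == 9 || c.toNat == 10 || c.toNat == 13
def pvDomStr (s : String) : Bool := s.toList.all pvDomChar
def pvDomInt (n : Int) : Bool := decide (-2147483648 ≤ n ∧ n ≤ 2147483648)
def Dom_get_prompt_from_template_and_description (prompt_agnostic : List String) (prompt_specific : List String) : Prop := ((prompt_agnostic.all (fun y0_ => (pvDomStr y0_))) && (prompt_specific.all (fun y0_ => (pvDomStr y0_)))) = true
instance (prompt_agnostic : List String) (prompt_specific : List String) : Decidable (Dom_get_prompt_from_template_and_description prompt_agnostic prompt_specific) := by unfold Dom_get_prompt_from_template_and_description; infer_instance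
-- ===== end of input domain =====

-- B restructures A's work: it parses the sentinel-tagged specifics and the '{}' template
-- segments (lowercasing them) ONCE each, so the inner product loop only joins precomputed
-- lowered pieces (objective: faster by a constant factor, as measured; equal return values on Pre_).

-- ===== PORT A =====
-- Hand port of `temp_agnostic.format(x)` with one positional argument: scans the escapes
-- '{{' / '}}' and the auto field '{}'. Exact on templates admitted by Pre_ below (braces
-- occur only as those three shapes, at most one '{}'); elsewhere Python's format raises
-- or engages its indexed/named/spec mini-language, which Pre_ excludes.
def pyFormat1 (x : List Char) : List Char → List Char
  | '{' :: '{' :: rest => '{' :: pyFormat1 x rest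
  | '}' :: '}' :: rest => '}' :: pyFormat1 x rest
  | '{' :: '}' :: rest => x ++ pyFormat1 x rest
  | c :: rest => c :: pyFormat1 x rest
  | [] => []

def get_prompt_from_template_and_description (prompt_agnostic : List String) (prompt_specific : List String) : List String :=
  prompt_agnostic.foldl (fun prompt_all_list temp_agnostic =>
    prompt_specific.foldl (fun prompt_all_list temp_specific =>
      let temp_prompt :=
        if PySem.Str.isIn "**+*+**" temp_specific then
          -- the sentinel is present, so split? is some and has ≥ 2 parts: the defaults are never used
          let parts := (PySem.Str.split? temp_specific "**+*+**").getD []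
          let temp_label := PySem.List.pyGetD parts 0 ""
          let temp_description := PySem.List.pyGetD parts 1 ""
          -- string concatenation '… + " " + …' done on the char lists (exact)
          String.ofList (pyFormat1 temp_label.toList temp_agnostic.toList ++ ' ' :: temp_description.toList)
        else
          String.ofList (pyFormat1 temp_specific.toList temp_agnostic.toList)
      prompt_all_list ++ [PySem.Str.lower temp_prompt]) prompt_all_list) []

-- ===== PORT B =====
-- Source B's _parse_specific, one entry: (lowered label, lowered " description" suffix)
def parseSpecific (s : String) : String × String :=
  if PySem.Str.isIn "**+*+**" s then
    let parts := (PySem.Str.split? s "**+*+**").getD []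
    (PySem.Str.lower (PySem.List.pyGetD parts 0 ""),
     String.ofList (' ' :: (PySem.Str.lower (PySem.List.pyGetD parts 1 "")).toList))
  else (PySem.Str.lower s, "")

-- Source B's _parse_template while-loop: cur/segs accumulators, two-char lookahead
def parseTemplate : List Char → List Char → List (List Char) → List (List Char)
  | '{' :: '{' :: rest, cur, segs => parseTemplate rest (cur ++ ['{']) segs
  | '}' :: '}' :: rest, cur, segs => parseTemplate rest (cur ++ ['}']) segs
  | '{' :: '}' :: rest, cur, segs => parseTemplate rest [] (segs ++ [PySem.Chars.lower cur])
  | c :: rest, cur, segs => parseTemplate rest (cur ++ [c]) segs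
  | [], cur, segs => segs ++ [PySem.Chars.lower cur]

def get_prompt_from_template_and_description_alt (prompt_agnostic : List String) (prompt_specific : List String) : List String :=
  let parsed := prompt_specific.map parseSpecific
  prompt_agnostic.foldl (fun out t =>
    let segs := parseTemplate t.toList [] []
    parsed.foldl (fun out p =>
      out ++ [String.ofList (PySem.Chars.join p.1.toList segs ++ p.2.toList)]) out) []

-- ===== PRECONDITION & SPEC =====
-- brace discipline of a template, with a budget n of remaining '{}' auto fields
def templOK : List Char → Nat → Bool
  | '{' :: '{' :: rest, n => templOK rest n
  | '}' :: '}' :: rest, n => templOK rest n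
  | '{' :: '}' :: rest, n => decide (0 < n) && templOK rest (n - 1)
  | '{' :: _, _ => false
  | '}' :: _, _ => false
  | _ :: rest, n => templOK rest n
  | [], _ => true

-- Pre_ excludes (unless prompt_specific is empty, when no template is ever formatted) the
-- templates whose braces are anything but the escapes '{{'/'}}' and at most one plain '{}':
-- on any other brace use Python's str.format raises (lone brace → ValueError, a second auto
-- field → IndexError) or engages the indexed/named/format-spec mini-language, which this
-- simple one-placeholder prompt combiner does not reproduce.
def Pre_get_prompt_from_template_and_description (prompt_agnostic : List String) (prompt_specific : List String) : Prop :=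
  prompt_specific = [] ∨ prompt_agnostic.all (fun t => templOK t.toList 1) = true
instance (prompt_agnostic : List String) (prompt_specific : List String) : Decidable (Pre_get_prompt_from_template_and_description prompt_agnostic prompt_specific) := by unfold Pre_get_prompt_from_template_and_description; infer_instance

def pvWitness_get_prompt_from_template_and_description : List String × List String :=
  (["a photo of a {}."], ["dog**+*+**a domestic animal", "cat"])

def Spec_get_prompt_from_template_and_description (prompt_agnostic : List String) (prompt_specific : List String) (out : List String) : Prop := out = get_prompt_from_template_and_description_alt prompt_agnostic prompt_specific
instance (prompt_agnostic : List String) (prompt_specific : List String) (out : List String) : Decidable (Spec_get_prompt_from_template_and_description prompt_agnostic prompt_specific out) := by unfold Spec_get_prompt_from_template_and_description; infer_instance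

-- ===== CLAIM (what is proved, stated in full; the proofs are below) =====
def Claim_equal_get_prompt_from_template_and_description : Prop := ∀ (prompt_agnostic : List String) (prompt_specific : List String), Dom_get_prompt_from_template_and_description prompt_agnostic prompt_specific → Pre_get_prompt_from_template_and_description prompt_agnostic prompt_specific → Spec_get_prompt_from_template_and_description prompt_agnostic prompt_specific (get_prompt_from_template_and_description prompt_agnostic prompt_specific)

-- ===== LEMMAS AND PROOFS =====
-- prepend a chunk onto the first segment
def consSeg (p : List Char) : List (List Char) → List (List Char)
  | [] => [p]
  | h :: t => (p ++ h) :: t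

theorem consSeg_assoc (a b : List Char) (P : List (List Char)) :
    consSeg (a ++ b) P = consSeg a (consSeg b P) := by
  cases P <;> simp [consSeg]

theorem parseTemplate_ne_nil (l cur segs) : parseTemplate l cur segs ≠ [] := by
  induction l, cur, segs using parseTemplate.induct <;> simp_all [parseTemplate]

theorem join_consSeg (sep p : List Char) (P : List (List Char)) (h : P ≠ []) :
    PySem.Chars.join sep (consSeg p P) = p ++ PySem.Chars.join sep P := by
  match P with
  | [] => exact absurd rfl h
  | [a] => simp [consSeg, PySem.Chars.join_singleton]
  | a :: b :: t => simp [consSeg, PySem.Chars.join_cons_cons]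

-- induction skeleton matching the two-char lookahead of parseTemplate / pyFormat1 / templOK
def tList : List Char → Nat
  | '{' :: '{' :: r => tList r
  | '}' :: '}' :: r => tList r
  | '{' :: '}' :: r => tList r
  | _ :: r => tList r
  | [] => 0

theorem parseTemplate_generic (c : Char) (r cur : List Char) (segs : List (List Char))
    (h1 : ∀ (rr : List Char), c = '{' → r = '{' :: rr → False)
    (h2 : ∀ (rr : List Char), c = '}' → r = '}' :: rr → False)
    (h3 : ∀ (rr : List Char), c = '{' → r = '}' :: rr → False) :
    parseTemplate (c :: r) cur segs = parseTemplate r (cur ++ [c]) segs := by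
  rw [parseTemplate.eq_def]; split <;> simp_all

theorem pyFormat1_generic (x : List Char) (c : Char) (r : List Char)
    (h1 : ∀ (rr : List Char), c = '{' → r = '{' :: rr → False)
    (h2 : ∀ (rr : List Char), c = '}' → r = '}' :: rr → False)
    (h3 : ∀ (rr : List Char), c = '{' → r = '}' :: rr → False) :
    pyFormat1 x (c :: r) = c :: pyFormat1 x r := by
  rw [pyFormat1.eq_def]; split <;> simp_all

theorem lower_append (a b : List Char) :
    PySem.Chars.lower (a ++ b) = PySem.Chars.lower a ++ PySem.Chars.lower b := by
  simp [PySem.Chars.lower]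

theorem parseTemplate_acc (l : List Char) : ∀ (cur : List Char) (segs : List (List Char)),
    parseTemplate l cur segs = segs ++ consSeg (PySem.Chars.lower cur) (parseTemplate l [] []) := by
  induction l using tList.induct with
  | case1 r ih =>
    intro cur segs
    show parseTemplate r (cur ++ ['{']) segs = segs ++ consSeg _ (parseTemplate r ['{'] [])
    rw [ih (cur ++ ['{']) segs, ih ['{'] [], lower_append, consSeg_assoc]
    rfl
  | case2 r ih =>
    intro cur segs
    show parseTemplate r (cur ++ ['}']) segs = segs ++ consSeg _ (parseTemplate r ['}'] [])
    rw [ih (cur ++ ['}']) segs, ih ['}'] [], lower_append, consSeg_assoc]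
    rfl
  | case3 r ih =>
    intro cur segs
    show parseTemplate r [] (segs ++ [PySem.Chars.lower cur])
        = segs ++ consSeg _ (parseTemplate r [] ([] ++ [PySem.Chars.lower []]))
    rw [ih [] (segs ++ [PySem.Chars.lower cur]), ih [] ([] ++ [PySem.Chars.lower []])]
    cases h : parseTemplate r [] [] with
    | nil => exact absurd h (parseTemplate_ne_nil r [] [])
    | cons a t => simp [consSeg, PySem.Chars.lower]
  | case4 c r h1 h2 h3 ih =>
    intro cur segs
    rw [parseTemplate_generic c r cur segs h1 h2 h3,
        parseTemplate_generic c r [] [] h1 h2 h3]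
    simp only [List.nil_append]
    rw [ih (cur ++ [c]) segs, ih [c] [], lower_append, consSeg_assoc]
    rfl
  | case5 =>
    intro cur segs
    simp [parseTemplate, consSeg, PySem.Chars.lower]

theorem lower_pyFormat1 (x : List Char) (t : List Char) :
    PySem.Chars.lower (pyFormat1 x t)
      = PySem.Chars.join (PySem.Chars.lower x) (parseTemplate t [] []) := by
  induction t using tList.induct with
  | case1 r ih =>
    show PySem.Chars.lower ('{' :: pyFormat1 x r) = PySem.Chars.join _ (parseTemplate r ['{'] [])
    rw [parseTemplate_acc r ['{'] []]
    simp only [List.nil_append]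
    rw [
        join_consSeg _ _ _ (parseTemplate_ne_nil r [] [])]
    simpa [PySem.Chars.lower] using ih
  | case2 r ih =>
    show PySem.Chars.lower ('}' :: pyFormat1 x r) = PySem.Chars.join _ (parseTemplate r ['}'] [])
    rw [parseTemplate_acc r ['}'] []]
    simp only [List.nil_append]
    rw [
        join_consSeg _ _ _ (parseTemplate_ne_nil r [] [])]
    simpa [PySem.Chars.lower] using ih
  | case3 r ih =>
    show PySem.Chars.lower (x ++ pyFormat1 x r)
        = PySem.Chars.join _ (parseTemplate r [] ([] ++ [PySem.Chars.lower []]))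
    rw [parseTemplate_acc r [] ([] ++ [PySem.Chars.lower []]), lower_append, ih]
    have hne := parseTemplate_ne_nil r [] []
    cases h : parseTemplate r [] [] with
    | nil => exact absurd h hne
    | cons a t' =>
      simp [consSeg, PySem.Chars.lower, PySem.Chars.join_cons_cons]
  | case4 c r h1 h2 h3 ih =>
    rw [pyFormat1_generic x c r h1 h2 h3,
        parseTemplate_generic c r [] [] h1 h2 h3]
    simp only [List.nil_append]
    rw [parseTemplate_acc r [c] []]
    simp only [List.nil_append]
    rw [join_consSeg _ _ _ (parseTemplate_ne_nil r [] [])]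
    simpa [PySem.Chars.lower] using ih
  | case5 =>
    simp [parseTemplate, pyFormat1, PySem.Chars.lower, PySem.Chars.join_singleton]

-- the value A appends for the pair (t, s) equals the value B appends for (t, parseSpecific s)
theorem map_lowerChar_pyFormat1 (x t : List Char) :
    List.map PySem.Chars.lowerChar (pyFormat1 x t)
      = PySem.Chars.join (List.map PySem.Chars.lowerChar x) (parseTemplate t [] []) :=
  lower_pyFormat1 x t

theorem pair_eq (t s : String) :
    PySem.Str.lower
      (if PySem.Str.isIn "**+*+**" s then
        String.ofList (pyFormat1 (PySem.List.pyGetD ((PySem.Str.split? s "**+*+**").getD []) 0 "").toList t.toList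
          ++ ' ' :: (PySem.List.pyGetD ((PySem.Str.split? s "**+*+**").getD []) 1 "").toList)
      else String.ofList (pyFormat1 s.toList t.toList))
    = String.ofList (PySem.Chars.join (parseSpecific s).1.toList (parseTemplate t.toList [] [])
        ++ (parseSpecific s).2.toList) := by
  have hsp : PySem.Chars.lowerChar ' ' = ' ' := by decide
  by_cases h : PySem.Chars.isIn ['*', '*', '+', '*', '+', '*', '*'] s.toList = true <;>
    simp [parseSpecific, PySem.Str.lower, h, hsp, map_lowerChar_pyFormat1, PySem.Chars.lower]

theorem main_eq (pa ps : List String) :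
    get_prompt_from_template_and_description pa ps = get_prompt_from_template_and_description_alt pa ps := by
  unfold get_prompt_from_template_and_description get_prompt_from_template_and_description_alt
  simp only [PySem.List.foldl_append_singleton_eq_map, PySem.List.foldl_append_eq_flatMap,
    List.map_map, List.nil_append]
  congr 1
  funext t
  congr 1
  funext s
  exact pair_eq t s

-- ===== VERDICT (by name: the statement is the Claim_ definition above) =====
theorem get_prompt_from_template_and_description_spec : Claim_equal_get_prompt_from_template_and_description := by
  intro pa ps _ _
  unfold Spec_get_prompt_from_template_and_description
  exact main_eq pa ps
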